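-- pv_equiv track=rewrite | github.com/migueldsw/crawlers | mycrawlers/mycrawlers/spiders/prs_spider.py | remove_trash_itens
-- ===== SOURCE A (Python) =====
-- def remove_trash_itens(itens_lst,words_lst):
-- 	out = []
-- 	if words_lst == []:
-- 		return itens_lst
-- 	for i in itens_lst:
-- 		ok = True
-- 		for w in words_lst:
-- 			if w in i:
-- 				ok = False
-- 		if ok:
-- 			out.append(i)
-- 	return out
-- ===== SOURCE B (Python) =====
-- def remove_trash_itens(itens_lst, words_lst):
--     out = itens_lst
--     for w in words_lst:
--         out = [i for i in out if w not in i]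
--     return out
-- ===== Notes on version B (the rewrite author's own statement) =====
-- stated objective: simpler
-- what changed: B loops over forbidden words (outer) and successively filters the surviving items per word, instead of A's per-item inner word scan with an ok flag; the empty-words case falls out naturally with no guard, and items already removed are never re-scanned for later words.
import Mathlib
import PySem

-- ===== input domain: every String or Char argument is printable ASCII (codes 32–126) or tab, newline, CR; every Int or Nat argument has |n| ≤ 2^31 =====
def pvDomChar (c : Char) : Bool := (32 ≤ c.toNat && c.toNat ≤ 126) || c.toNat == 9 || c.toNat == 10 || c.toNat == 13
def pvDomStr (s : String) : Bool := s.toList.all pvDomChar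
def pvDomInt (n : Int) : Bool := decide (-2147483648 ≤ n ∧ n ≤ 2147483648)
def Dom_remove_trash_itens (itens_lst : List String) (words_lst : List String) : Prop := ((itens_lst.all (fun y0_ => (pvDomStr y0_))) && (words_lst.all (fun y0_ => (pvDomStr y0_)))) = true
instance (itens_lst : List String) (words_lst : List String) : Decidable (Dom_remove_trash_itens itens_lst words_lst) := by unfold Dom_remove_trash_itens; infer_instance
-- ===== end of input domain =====

-- B replaces A's per-item inner word scan (ok flag) by an outer loop over the words that
-- successively filters the surviving items; the empty-words case needs no guard (objective: simpler).

-- ===== PORT A =====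
def remove_trash_itens (itens_lst : List String) (words_lst : List String) : List String :=
  if words_lst == [] then itens_lst
  else
    itens_lst.foldl (fun out i =>
      let ok := words_lst.foldl (fun ok w => if PySem.Str.isIn w i then false else ok) true
      if ok then out ++ [i] else out) []

-- ===== PORT B =====
def remove_trash_itens_alt (itens_lst : List String) (words_lst : List String) : List String :=
  words_lst.foldl (fun out w => out.filter (fun i => !PySem.Str.isIn w i)) itens_lst

-- ===== PRECONDITION & SPEC =====
def Spec_remove_trash_itens (itens_lst : List String) (words_lst : List String) (out : List String) : Prop := out = remove_trash_itens_alt itens_lst words_lst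
instance (itens_lst : List String) (words_lst : List String) (out : List String) : Decidable (Spec_remove_trash_itens itens_lst words_lst out) := by unfold Spec_remove_trash_itens; infer_instance

-- ===== CLAIM (what is proved, stated in full; the proofs are below) =====
def Claim_equal_remove_trash_itens : Prop := ∀ (itens_lst : List String) (words_lst : List String), Dom_remove_trash_itens itens_lst words_lst → Spec_remove_trash_itens itens_lst words_lst (remove_trash_itens itens_lst words_lst)

-- ===== LEMMAS AND PROOFS =====

-- A's inner flag loop computes "no word occurs in i".
theorem inner_flag_eq_all (i : String) (ws : List String) (b : Bool) :
    ws.foldl (fun ok w => if PySem.Str.isIn w i then false else ok) b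
      = (b && ws.all (fun w => !PySem.Str.isIn w i)) := by
  induction ws generalizing b with
  | nil => simp
  | cons w ws ih =>
    simp only [List.foldl_cons, List.all_cons, ih]
    cases h : PySem.Str.isIn w i <;> simp

-- B's successive filters compute one filter by the conjunction of all word tests.
theorem foldl_filter_eq_filter_all (ws : List String) (xs : List String) :
    ws.foldl (fun out w => out.filter (fun i => !PySem.Str.isIn w i)) xs
      = xs.filter (fun i => ws.all (fun w => !PySem.Str.isIn w i)) := by
  induction ws generalizing xs with
  | nil => simp
  | cons w ws ih =>
    simp only [List.foldl_cons, ih, List.filter_filter, List.all_cons]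
    congr 1
    funext i
    cases h : PySem.Str.isIn w i <;> simp [h]

theorem outer_foldl_eq_filter (words : List String) (xs acc : List String) :
    xs.foldl (fun out i =>
      let ok := words.foldl (fun ok w => if PySem.Str.isIn w i then false else ok) true
      if ok then out ++ [i] else out) acc
    = acc ++ xs.filter (fun i => words.all (fun w => !PySem.Str.isIn w i)) := by
  induction xs generalizing acc with
  | nil => simp
  | cons x xs ih =>
    rw [List.foldl_cons, List.filter_cons]
    show List.foldl _ (if (words.foldl (fun ok w => if PySem.Str.isIn w x then false else ok) true) then acc ++ [x] else acc) xs = _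
    rw [inner_flag_eq_all, Bool.true_and]
    cases h2 : (words.all fun w => !PySem.Str.isIn w x)
    · rw [if_neg (by simp [h2]), ih]
      simp [h2]
    · rw [if_pos (by simp [h2]), ih]
      simp [h2, List.append_assoc]

-- ===== VERDICT (by name: the statement is the Claim_ definition above) =====
theorem remove_trash_itens_spec : Claim_equal_remove_trash_itens := by
  intro itens words _
  unfold Spec_remove_trash_itens remove_trash_itens remove_trash_itens_alt
  rw [foldl_filter_eq_filter_all]
  by_cases hw : words = []
  · simp [hw]
  · rw [if_neg (by simpa using hw), outer_foldl_eq_filter]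
    simp
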